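-- pv_equiv track=rewrite | github.com/Kishore276/100-days-python-challenge | 91.2.Compute the product of all Armstrong numbers below N.py | product_of_armstrong_numbers
-- ===== SOURCE A (Python) =====
-- def is_armstrong(num):
--     digits = list(map(int, str(num)))
--     power = len(digits)
--     return sum(d ** power for d in digits) == num
--
-- def product_of_armstrong_numbers(n):
--     product = 1
--     found = False
--     for num in range(1, n):
--         if is_armstrong(num):
--             product *= num
--             found = True
--     return product if found else 0
-- ===== SOURCE B (Python) =====
-- def product_of_armstrong_numbers(n):
--     product = 0  # 0 = none found yet (every Armstrong number here is >= 1)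
--     for num in range(1, n):
--         p, t = 1, num
--         while t >= 10:
--             t //= 10
--             p += 1
--         s, m = 0, num
--         while m > 0:
--             s += (m % 10) ** p
--             m //= 10
--         if s == num:
--             product = num if product == 0 else product * num
--     return product
-- ===== Notes on version B (the rewrite author's own statement) =====
-- stated objective: faster
-- what changed: B replaces the per-number str()/list(map(int,...)) digit decomposition by two pure-arithmetic loops (digit count by repeated //10, power sum by divmod) and replaces the found flag by a 0-sentinel product.
import Mathlib
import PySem

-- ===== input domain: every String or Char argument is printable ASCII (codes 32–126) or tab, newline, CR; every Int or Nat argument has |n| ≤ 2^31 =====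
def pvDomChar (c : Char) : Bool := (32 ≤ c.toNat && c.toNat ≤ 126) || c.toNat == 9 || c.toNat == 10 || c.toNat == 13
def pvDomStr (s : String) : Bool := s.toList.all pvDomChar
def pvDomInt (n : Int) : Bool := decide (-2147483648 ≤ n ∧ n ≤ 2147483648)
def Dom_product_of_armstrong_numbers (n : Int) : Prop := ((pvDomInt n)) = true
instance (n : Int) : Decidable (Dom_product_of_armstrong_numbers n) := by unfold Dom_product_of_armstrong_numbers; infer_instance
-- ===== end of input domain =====

-- B replaces A's per-number str()/map(int,...) digit decomposition by two pure-arithmetic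
-- loops (digit count by repeated //10, power sum by divmod) and the found flag by a
-- 0-sentinel product; measured constant-factor speedup, same results.

-- ===== PORT A =====
-- int(c) for one character, exact via PySem.Int.ofChars?; the 0 default is taken only where
-- Python would raise ValueError (unreachable: str(num) of num ≥ 1 consists of digits).
def pyIntChar (c : Char) : Int := (PySem.Int.ofChars? [c]).getD 0

def is_armstrong (num : Int) : Bool :=
  let digits := (PySem.Int.toChars num).map pyIntChar
  let power := digits.length
  decide ((digits.map (fun d => d ^ power)).sum = num)

def product_of_armstrong_numbers (n : Int) : Int :=
  let st := (PySem.List.pyRange 1 n 1).foldl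
    (fun (st : Int × Bool) num => if is_armstrong num then (st.1 * num, true) else st)
    (1, false)
  if st.2 then st.1 else 0

-- ===== PORT B =====
-- while t >= 10: t //= 10; p += 1      (t = num and p stay ≥ 0 in B, so Nat carries them exactly)
def altLenLoop (t : Nat) (p : Nat) : Nat :=
  if 10 ≤ t then altLenLoop (t / 10) (p + 1) else p
decreasing_by exact Nat.div_lt_self (by omega) (by omega)

-- while m > 0: s += (m % 10) ** p; m //= 10
def altSumLoop (m : Nat) (p : Nat) (s : Int) : Int :=
  if 0 < m then altSumLoop (m / 10) p (s + ((m % 10 : Nat) : Int) ^ p) else s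
decreasing_by exact Nat.div_lt_self (by omega) (by omega)

def product_of_armstrong_numbers_alt (n : Int) : Int :=
  (PySem.List.pyRange 1 n 1).foldl
    (fun product num =>
      let p := altLenLoop num.toNat 1
      let s := altSumLoop num.toNat p 0
      if s = num then (if product = 0 then num else product * num) else product)
    0

-- ===== PRECONDITION & SPEC =====
def Spec_product_of_armstrong_numbers (n : Int) (out : Int) : Prop := out = product_of_armstrong_numbers_alt n
instance (n : Int) (out : Int) : Decidable (Spec_product_of_armstrong_numbers n out) := by unfold Spec_product_of_armstrong_numbers; infer_instance

-- ===== CLAIM (what is proved, stated in full; the proofs are below) =====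
def Claim_equal_product_of_armstrong_numbers : Prop := ∀ (n : Int), Dom_product_of_armstrong_numbers n → Spec_product_of_armstrong_numbers n (product_of_armstrong_numbers n)

-- ===== LEMMAS AND PROOFS =====

-- Nat.toDigits (what str(num) prints for num ≥ 1) is the reversed decimal digit list.
theorem toDigitsCore_eq (f : Nat) : ∀ (m : Nat), 0 < m → m < f → ∀ (acc : List Char),
    Nat.toDigitsCore 10 f m acc = ((Nat.digits 10 m).map Nat.digitChar).reverse ++ acc := by
  induction f with
  | zero => intro m hm hf; omega
  | succ f ih =>
    intro m hm hf acc
    rw [Nat.toDigitsCore]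
    rw [Nat.digits_def' (by norm_num : 1 < 10) hm]
    by_cases h : m / 10 = 0
    · simp [h, Nat.digits_zero]
    · have hlt : m / 10 < f := by
        have := Nat.div_lt_self hm (by norm_num : 1 < 10); omega
      simp only [h, if_false]
      rw [ih (m / 10) (Nat.pos_of_ne_zero h) hlt]
      simp

theorem toDigits_eq (m : Nat) (hm : 0 < m) :
    Nat.toDigits 10 m = ((Nat.digits 10 m).map Nat.digitChar).reverse := by
  rw [Nat.toDigits]
  rw [toDigitsCore_eq (m + 1) m hm (by omega) []]
  simp

theorem pyIntChar_digitChar (d : Nat) (hd : d < 10) : pyIntChar (Nat.digitChar d) = (d : Int) := by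
  interval_cases d <;> decide

theorem altLenLoop_eq : ∀ (t : Nat), 0 < t → ∀ (p : Nat),
    altLenLoop t p = (Nat.digits 10 t).length - 1 + p := by
  intro t
  induction t using Nat.strong_induction_on with
  | _ t ih =>
    intro ht p
    rw [altLenLoop, Nat.digits_def' (by norm_num : 1 < 10) ht]
    by_cases h : 10 ≤ t
    · have ht10 : 0 < t / 10 := Nat.div_pos h (by norm_num)
      have hlt : t / 10 < t := Nat.div_lt_self ht (by norm_num)
      rw [if_pos h, ih (t / 10) hlt ht10 (p + 1)]
      have hne : Nat.digits 10 (t / 10) ≠ [] :=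
        Nat.digits_ne_nil_iff_ne_zero.mpr (by omega)
      have : 0 < (Nat.digits 10 (t / 10)).length := List.length_pos_iff.mpr hne
      simp only [List.length_cons]
      omega
    · have : t / 10 = 0 := Nat.div_eq_of_lt (by omega)
      rw [if_neg h, this]
      simp

theorem altSumLoop_eq : ∀ (m : Nat) (p : Nat) (s : Int),
    altSumLoop m p s = s + ((Nat.digits 10 m).map (fun d : Nat => (Int.ofNat d) ^ p)).sum := by
  intro m
  induction m using Nat.strong_induction_on with
  | _ m ih =>
    intro p s
    rw [altSumLoop]
    by_cases h : 0 < m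
    · have hlt : m / 10 < m := Nat.div_lt_self h (by norm_num)
      rw [if_pos h, ih (m / 10) hlt p, Nat.digits_def' (by norm_num : 1 < 10) h]
      simp; ring
    · have : m = 0 := by omega
      subst this; simp

-- the per-number check: A's string-based test equals B's arithmetic test, for num ≥ 1
theorem armstrong_eq (num : Int) (h : 1 ≤ num) :
    is_armstrong num =
      decide (altSumLoop num.toNat (altLenLoop num.toNat 1) 0 = num) := by
  have hnn : ¬ num < 0 := by omega
  have hm : 0 < num.toNat := by omega
  have hdig : ∀ d ∈ Nat.digits 10 num.toNat, d < 10 :=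
    fun d hd => Nat.digits_lt_base (by norm_num) hd
  have hmapped : (PySem.Int.toChars num).map pyIntChar
      = ((Nat.digits 10 num.toNat).map (fun d : Nat => Int.ofNat d)).reverse := by
    rw [PySem.Int.toChars, if_neg hnn, toDigits_eq num.toNat hm, List.map_reverse,
      List.map_map]
    congr 1
    apply List.map_congr_left
    intro d hd
    exact pyIntChar_digitChar d (hdig d hd)
  have hlen : altLenLoop num.toNat 1 = (Nat.digits 10 num.toNat).length := by
    rw [altLenLoop_eq num.toNat hm 1]
    have hne : Nat.digits 10 num.toNat ≠ [] :=
      Nat.digits_ne_nil_iff_ne_zero.mpr (by omega)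
    have : 0 < (Nat.digits 10 num.toNat).length := List.length_pos_iff.mpr hne
    omega
  rw [is_armstrong]
  simp only [hmapped, List.length_reverse, List.length_map, ← List.map_reverse,
    List.map_map]
  rw [altSumLoop_eq, hlen]
  simp [Function.comp_def]

-- loop invariant: A's (product, found) state corresponds to B's 0-sentinel product
theorem fold_equiv : ∀ (l : List Int), (∀ x ∈ l, 1 ≤ x) →
    ∀ (P : Int) (f : Bool) (acc : Int),
    (f = true → acc = P ∧ 0 < acc) → (f = false → acc = 0 ∧ P = 1) →
    (let st := l.foldl
        (fun (st : Int × Bool) num => if is_armstrong num then (st.1 * num, true) else st)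
        (P, f);
      if st.2 then st.1 else 0)
    = l.foldl
        (fun product num =>
          let p := altLenLoop num.toNat 1
          let s := altSumLoop num.toNat p 0
          if s = num then (if product = 0 then num else product * num) else product)
        acc := by
  intro l
  induction l with
  | nil =>
    intro _ P f acc ht hf
    cases f with
    | true => simpa using (ht rfl).1.symm
    | false => simpa using (hf rfl).1.symm
  | cons x xs ih =>
    intro hall P f acc ht hf
    have hx : 1 ≤ x := hall x List.mem_cons_self
    have hxs : ∀ y ∈ xs, 1 ≤ y := fun y hy => hall y (List.mem_cons_of_mem x hy)
    simp only [List.foldl_cons]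
    by_cases harm : is_armstrong x = true
    · have hcond : altSumLoop x.toNat (altLenLoop x.toNat 1) 0 = x := by
        have := armstrong_eq x hx
        rw [harm] at this
        exact of_decide_eq_true this.symm
      rw [harm]
      simp only [hcond]
      cases f with
      | true =>
        obtain ⟨hacc, hpos⟩ := ht rfl
        have : acc ≠ 0 := by omega
        rw [if_neg this, hacc]
        exact ih hxs (P * x) true (P * x)
          (fun _ => ⟨rfl, mul_pos (hacc ▸ hpos) (by omega)⟩) (by simp)
      | false =>
        obtain ⟨hacc, hP⟩ := hf rfl
        rw [hacc, if_pos rfl, hP, one_mul]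
        exact ih hxs x true x (fun _ => ⟨rfl, by omega⟩) (by simp)
    · have harm' : is_armstrong x = false := by
        cases hb : is_armstrong x
        · rfl
        · exact absurd hb harm
      have hcond : ¬ (altSumLoop x.toNat (altLenLoop x.toNat 1) 0 = x) := by
        have := armstrong_eq x hx
        rw [harm'] at this
        exact of_decide_eq_false this.symm
      rw [harm']
      simp only [if_neg hcond]
      exact ih hxs P f acc ht hf

-- ===== VERDICT (by name: the statement is the Claim_ definition above) =====
theorem product_of_armstrong_numbers_spec : Claim_equal_product_of_armstrong_numbers := by
  intro n _
  unfold Spec_product_of_armstrong_numbers product_of_armstrong_numbers product_of_armstrong_numbers_alt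
  exact fold_equiv (PySem.List.pyRange 1 n 1)
    (fun x hx => (PySem.List.mem_pyRange_one.mp hx).1)
    1 false 0 (by simp) (fun _ => ⟨rfl, rfl⟩)
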